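-- pv_equiv track=rewrite | github.com/edazizovv/harvey_pusher | reporter.py | get_worst_flag
-- ===== SOURCE A (Python) =====
-- def get_worst_flag(x, name):
--     _targets = list(x.keys())
--     _flags = [x[t][name] for t in _targets]
--     if 'red' in _flags:
--         return 'red'
--     elif 'yellow' in _flags:
--         return 'yellow'
--     else:
--         return 'green'
-- ===== SOURCE B (Python) =====
-- RANK = {'yellow': 1, 'red': 2}
-- COLORS = ('green', 'yellow', 'red')
--
-- def get_worst_flag(x, name):
--     worst = 0
--     for t in x:
--         worst = max(worst, RANK.get(x[t][name], 0))
--     return COLORS[worst]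
-- ===== Notes on version B (the rewrite author's own statement) =====
-- stated objective: alternative
-- what changed: Replaces A's build-a-flags-list-then-two-membership-scans with a numeric severity ranking: each flag is mapped to a rank (red=2, yellow=1, other=0), the maximum rank is accumulated in one pass, and the result is read back from a color table.
-- outside the precondition, e.g. on get_worst_flag({'a': {}}, 'f'): A raises KeyError, B raises KeyError
import Mathlib
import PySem

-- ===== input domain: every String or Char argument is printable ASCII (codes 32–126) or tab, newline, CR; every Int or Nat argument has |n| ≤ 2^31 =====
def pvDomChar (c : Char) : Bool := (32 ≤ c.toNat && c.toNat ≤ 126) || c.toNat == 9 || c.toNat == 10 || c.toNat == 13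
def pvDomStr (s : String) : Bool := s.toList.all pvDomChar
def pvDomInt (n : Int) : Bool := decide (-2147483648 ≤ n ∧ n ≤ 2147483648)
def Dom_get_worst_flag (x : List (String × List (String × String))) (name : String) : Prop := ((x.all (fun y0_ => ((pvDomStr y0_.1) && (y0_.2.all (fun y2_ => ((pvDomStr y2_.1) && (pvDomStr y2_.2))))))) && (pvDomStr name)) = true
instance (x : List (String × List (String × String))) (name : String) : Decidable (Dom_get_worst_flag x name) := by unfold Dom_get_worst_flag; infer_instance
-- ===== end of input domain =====

-- B replaces A's flags-list + two membership scans with a numeric severity ranking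
-- (red=2, yellow=1, other=0), accumulating the maximum rank in one pass and reading
-- the answer from a color table (alternative decomposition; same cost).


-- x[t] / kvs[name]: first-match association-list lookup (Python dict lookup);
-- .getD is only reached outside Pre_, where Python raises KeyError.
def pvLookupFlag (x : List (String × List (String × String))) (name : String) (t : String) : String :=
  (((x.lookup t).getD []).lookup name).getD ""

-- ===== PORT A =====
def get_worst_flag (x : List (String × List (String × String))) (name : String) : String :=
  let _targets := x.map (·.1)
  let _flags := _targets.map (fun t => pvLookupFlag x name t)
  if _flags.contains "red" then "red"
  else if _flags.contains "yellow" then "yellow"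
  else "green"

-- ===== PORT B =====
-- RANK.get(v, 0)
def pvRank (v : String) : Nat :=
  (([("yellow", 1), ("red", 2)] : List (String × Nat)).lookup v).getD 0

-- COLORS[worst]; worst is always 0, 1 or 2, so the default is never reached.
def pvColors : List String := ["green", "yellow", "red"]

def get_worst_flag_alt (x : List (String × List (String × String))) (name : String) : String :=
  let worst := x.foldl (fun w p => max w (pvRank (pvLookupFlag x name p.1))) 0
  pvColors.getD worst ""

-- ===== PRECONDITION & SPEC =====
-- Pre_: Python raises KeyError when some inner dict lacks the key `name`; exactly those inputs are excluded.
def Pre_get_worst_flag (x : List (String × List (String × String))) (name : String) : Prop :=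
  (x.all (fun p => (p.2.lookup name).isSome)) = true
instance (x : List (String × List (String × String))) (name : String) : Decidable (Pre_get_worst_flag x name) := by unfold Pre_get_worst_flag; infer_instance

def pvWitness_get_worst_flag : (List (String × List (String × String))) × String :=
  ([("a", [("f", "red")]), ("b", [("f", "green")])], "f")

def Spec_get_worst_flag (x : List (String × List (String × String))) (name : String) (out : String) : Prop := out = get_worst_flag_alt x name
instance (x : List (String × List (String × String))) (name : String) (out : String) : Decidable (Spec_get_worst_flag x name out) := by unfold Spec_get_worst_flag; infer_instance

-- ===== CLAIM (what is proved, stated in full; the proofs are below) =====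
def Claim_equal_get_worst_flag : Prop := ∀ (x : List (String × List (String × String))) (name : String), Dom_get_worst_flag x name → Pre_get_worst_flag x name → Spec_get_worst_flag x name (get_worst_flag x name)

-- ===== LEMMAS AND PROOFS =====

-- The rank of a list of flags: 2 if some flag is red, else 1 if some is yellow, else 0.
def pvListRank (fs : List String) : Nat :=
  if fs.contains "red" then 2 else if fs.contains "yellow" then 1 else 0

theorem pv_rank_eq (v : String) :
    pvRank v = if v = "red" then 2 else if v = "yellow" then 1 else 0 := by
  unfold pvRank
  simp only [List.lookup]
  cases h2 : (v == "yellow") <;> cases h1 : (v == "red") <;> simp_all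

theorem pv_listRank_cons (v : String) (fs : List String) :
    pvListRank (v :: fs) = max (pvRank v) (pvListRank fs) := by
  unfold pvListRank
  rw [pv_rank_eq]
  by_cases h1 : v = "red" <;> by_cases h2 : v = "yellow" <;>
    by_cases hr : fs.contains "red" <;> by_cases hy : fs.contains "yellow" <;>
      simp_all [List.contains_cons, eq_comm]

theorem pv_foldMax (x : List (String × List (String × String))) (name : String) :
    ∀ (l : List (String × List (String × String))) (a : Nat),
      l.foldl (fun w p => max w (pvRank (pvLookupFlag x name p.1))) a =
        max a (pvListRank (l.map (fun p => pvLookupFlag x name p.1))) := by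
  intro l
  induction l with
  | nil => intro a; simp [pvListRank]
  | cons p l ih =>
      intro a
      simp only [List.foldl_cons, List.map_cons, ih, pv_listRank_cons]
      omega

-- ===== VERDICT (by name: the statement is the Claim_ definition above) =====
theorem get_worst_flag_spec : Claim_equal_get_worst_flag := by
  intro x name _ _
  unfold Spec_get_worst_flag get_worst_flag get_worst_flag_alt
  rw [pv_foldMax]
  simp only [List.map_map, Function.comp_def, Nat.zero_max, pvListRank]
  split_ifs <;> rfl
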